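-- pv_equiv track=rewrite | github.com/dudwls0918/backjooon-algorithm | 3주차/16564.PY | search
-- ===== SOURCE A (Python) =====
-- def search(arr,K,start,end):
--     result=0
--     while start<=end:
--         count=0
--         mid=(start+end)//2
--
--         for i in range(len(arr)):
--             if arr[i]<mid:
--                 count += mid-arr[i]
--
--         if count<=K:
--             result=mid
--             start=mid+1
--
--         else:
--             end=mid-1
--
--     return result
-- ===== SOURCE B (Python) =====
-- def search(arr, K, start, end):
--     # Sort once and precompute prefix sums; each binary-search step then costs
--     # O(log n) (count elements < mid by an inner binary search, cost from prefix sums)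
--     # instead of A's O(n) scan.
--     s = sorted(arr)
--     pre = [0]
--     t = 0
--     for v in s:
--         t += v
--         pre.append(t)
--     result = 0
--     lo, hi = start, end
--     while lo <= hi:
--         mid = (lo + hi) // 2
--         a, b = 0, len(s)
--         while a < b:
--             m = (a + b) // 2
--             if s[m] < mid:
--                 a = m + 1
--             else:
--                 b = m
--         cost = a * mid - pre[a]
--         if cost <= K:
--             result = mid
--             lo = mid + 1
--         else:
--             hi = mid - 1
--     return result
-- ===== Notes on version B (the rewrite author's own statement) =====
-- stated objective: alternative
-- what changed: B sorts the array once and precomputes prefix sums, then evaluates each binary-search step's cost with an inner bisect-left binary search plus a prefix-sum formula instead of A's full scan of the array per step; intended as faster (measured 2.84x at the largest size but not consistently), so claimed only as an alternative.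
import Mathlib
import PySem

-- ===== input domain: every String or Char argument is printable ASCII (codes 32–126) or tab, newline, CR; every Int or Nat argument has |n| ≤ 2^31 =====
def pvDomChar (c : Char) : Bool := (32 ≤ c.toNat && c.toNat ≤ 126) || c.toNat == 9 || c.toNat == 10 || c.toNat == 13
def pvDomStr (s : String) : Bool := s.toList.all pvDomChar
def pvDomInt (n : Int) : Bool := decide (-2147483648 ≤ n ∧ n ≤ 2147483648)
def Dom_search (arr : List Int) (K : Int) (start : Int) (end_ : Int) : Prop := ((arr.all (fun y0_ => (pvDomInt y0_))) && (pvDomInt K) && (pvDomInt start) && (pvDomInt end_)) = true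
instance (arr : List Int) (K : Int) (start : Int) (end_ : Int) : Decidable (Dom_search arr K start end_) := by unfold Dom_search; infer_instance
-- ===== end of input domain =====

-- B answers each binary-search step from a sorted copy with prefix sums via an inner
-- bisect-left search, instead of A's full scan of the array at every step.

-- ===== PORT A =====
-- A's `while start <= end` loop; terminates because [start, end_] strictly shrinks
def searchLoop (arr : List Int) (K : Int) (start end_ result : Int) : Int :=
  if h : start ≤ end_ then
    let mid := PySem.Int.floordiv (start + end_) 2
    let count := (PySem.List.pyRange 0 (PySem.List.len arr) 1).foldl
      (fun count i =>
        if PySem.List.pyGetD arr i 0 < mid then count + (mid - PySem.List.pyGetD arr i 0)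
        else count) 0
    if count ≤ K then searchLoop arr K (mid + 1) end_ mid
    else searchLoop arr K start (mid - 1) result
  else result
termination_by (end_ - start + 1).toNat
decreasing_by
  · have := PySem.Int.floordiv_two_mid_bounds h; omega
  · have := PySem.Int.floordiv_two_mid_bounds h; omega

def search (arr : List Int) (K : Int) (start : Int) (end_ : Int) : Int :=
  searchLoop arr K start end_ 0

-- ===== PORT B =====
-- B's inner `while a < b` loop: bisect-left index of x in the sorted list s
def bisLoop (s : List Int) (x : Int) (a b : Int) : Int :=
  if h : a < b then
    let m := PySem.Int.floordiv (a + b) 2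
    if PySem.List.pyGetD s m 0 < x then bisLoop s x (m + 1) b
    else bisLoop s x a m
  else a
termination_by (b - a).toNat
decreasing_by
  · have := PySem.Int.floordiv_two_mid_bounds (le_of_lt h); omega
  · have h1 := PySem.Int.floordiv_mul_add_mod (a + b) 2
    have h2 := PySem.Int.mod_nonneg (a + b) (by norm_num : (0:Int) < 2)
    omega

-- B's outer `while lo <= hi` loop
def searchAltLoop (s pre : List Int) (K : Int) (lo hi result : Int) : Int :=
  if h : lo ≤ hi then
    let mid := PySem.Int.floordiv (lo + hi) 2
    let a := bisLoop s mid 0 (PySem.List.len s)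
    let cost := a * mid - PySem.List.pyGetD pre a 0
    if cost ≤ K then searchAltLoop s pre K (mid + 1) hi mid
    else searchAltLoop s pre K lo (mid - 1) result
  else result
termination_by (hi - lo + 1).toNat
decreasing_by
  · have := PySem.Int.floordiv_two_mid_bounds h; omega
  · have := PySem.Int.floordiv_two_mid_bounds h; omega

def search_alt (arr : List Int) (K : Int) (start : Int) (end_ : Int) : Int :=
  let s := PySem.List.sorted arr (fun x => x)
  let pt := s.foldl (fun (pt : List Int × Int) v => (pt.1 ++ [pt.2 + v], pt.2 + v)) ([0], 0)
  searchAltLoop s pt.1 K start end_ 0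

-- ===== PRECONDITION & SPEC =====
def Spec_search (arr : List Int) (K : Int) (start : Int) (end_ : Int) (out : Int) : Prop := out = search_alt arr K start end_
instance (arr : List Int) (K : Int) (start : Int) (end_ : Int) (out : Int) : Decidable (Spec_search arr K start end_ out) := by unfold Spec_search; infer_instance

-- ===== CLAIM (what is proved, stated in full; the proofs are below) =====
def Claim_equal_search : Prop := ∀ (arr : List Int) (K : Int) (start : Int) (end_ : Int), Dom_search arr K start end_ → Spec_search arr K start end_ (search arr K start end_)

-- ===== LEMMAS AND PROOFS =====

-- the list of running prefix sums (excluding the leading 0) that B's first loop appends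
def preAux : List Int → Int → List Int
  | [], _ => []
  | v :: vs, t => (t + v) :: preAux vs (t + v)

lemma fold_pre (s : List Int) : ∀ (p : List Int) (t : Int),
    (s.foldl (fun (pt : List Int × Int) v => (pt.1 ++ [pt.2 + v], pt.2 + v)) (p, t)).1
      = p ++ preAux s t := by
  induction s with
  | nil => intro p t; simp [preAux]
  | cons v vs ih => intro p t; simp only [List.foldl_cons, preAux, ih]; simp

lemma preAux_getD : ∀ (s : List Int) (t : Int) (k : Nat), k < s.length →
    (preAux s t).getD k 0 = t + (s.take (k + 1)).sum := by
  intro s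
  induction s with
  | nil => simp
  | cons v vs ih =>
    intro t k hk
    cases k with
    | zero => simp [preAux]
    | succ k => simp only [preAux, List.getD_cons_succ, List.take_succ_cons, List.sum_cons]
                rw [ih (t + v) k (by simpa using hk)]; ring

lemma pre_getD (s : List Int) (r : Nat) (hr : r ≤ s.length) :
    (0 :: preAux s 0).getD r 0 = (s.take r).sum := by
  cases r with
  | zero => simp
  | succ r => simpa using preAux_getD s 0 r (by omega)

lemma sum_map_sub (l : List Int) (x : Int) :
    (l.map (fun a => x - a)).sum = l.length * x - l.sum := by
  induction l with
  | nil => simp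
  | cons h t ih => simp [ih]; ring

-- the inner binary search returns a split point: everything before it is < x,
-- everything from it on is ≥ x
lemma bis_inv (s : List Int) (x : Int) (hs : s.Pairwise (· ≤ ·)) :
    ∀ (n : Nat) (a b : Int), (b - a).toNat ≤ n → 0 ≤ a → a ≤ b → b ≤ (s.length : Int) →
    (∀ (j : Nat) (hj : j < s.length), (j : Int) < a → s[j] < x) →
    (∀ (j : Nat) (hj : j < s.length), b ≤ (j : Int) → x ≤ s[j]) →
    ∃ r : Nat, bisLoop s x a b = (r : Int) ∧ r ≤ s.length ∧
      (∀ (j : Nat) (hj : j < s.length), j < r → s[j] < x) ∧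
      (∀ (j : Nat) (hj : j < s.length), r ≤ j → x ≤ s[j]) := by
  intro n
  induction n with
  | zero =>
    intro a b hn h0 hab hb hlo hhi
    have hba : a = b := by omega
    rw [bisLoop, dif_neg (by omega)]
    exact ⟨a.toNat, by omega, by omega, fun j hj hja => hlo j hj (by omega),
      fun j hj hja => hhi j hj (by omega)⟩
  | succ n ih =>
    intro a b hn h0 hab hb hlo hhi
    by_cases h : a < b
    · rw [bisLoop, dif_pos h]
      have hm := PySem.Int.floordiv_two_mid_bounds (le_of_lt h)
      have h1 := PySem.Int.floordiv_mul_add_mod (a + b) 2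
      have h2 := PySem.Int.mod_nonneg (a + b) (by norm_num : (0:Int) < 2)
      have h3 := PySem.Int.mod_lt (a + b) (by norm_num : (0:Int) < 2)
      set m := PySem.Int.floordiv (a + b) 2 with hmdef
      have hmlt : m < b := by omega
      have hmr : m < (s.length : Int) := by omega
      have hget : PySem.List.pyGetD s m 0 = s[m.toNat]'(by omega) :=
        PySem.List.pyGetD_eq_getElem s 0 (by omega) (by omega)
      have hpw := List.pairwise_iff_getElem.mp hs
      by_cases hc : PySem.List.pyGetD s m 0 < x
      · rw [if_pos hc]
        refine ih (m + 1) b (by omega) (by omega) (by omega) hb ?_ hhi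
        intro j hj hja
        rcases Nat.lt_or_ge j m.toNat with hlt | hge
        · exact lt_of_le_of_lt (hpw j m.toNat hj (by omega) hlt) (hget ▸ hc)
        · have : j = m.toNat := by omega
          subst this; exact hget ▸ hc
      · rw [if_neg hc]
        refine ih a m (by omega) h0 (by omega) (by omega) hlo ?_
        intro j hj hja
        rw [not_lt] at hc
        rw [hget] at hc
        rcases Nat.lt_or_ge m.toNat j with hlt | hge
        · exact le_trans hc (hpw m.toNat j (by omega) hj hlt)
        · have : j = m.toNat := by omega
          subst this; exact hc
    · rw [bisLoop, dif_neg h]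
      have hba : a = b := by omega
      exact ⟨a.toNat, by omega, by omega, fun j hj hja => hlo j hj (by omega),
        fun j hj hja => hhi j hj (by omega)⟩

-- per midpoint, B's prefix-sum cost equals A's scanned cost
lemma cost_eq (arr : List Int) (mid : Int) :
    (bisLoop (PySem.List.sorted arr (fun x => x)) mid 0
        (PySem.List.len (PySem.List.sorted arr (fun x => x)))) * mid
      - PySem.List.pyGetD
          ((PySem.List.sorted arr (fun x => x)).foldl
            (fun (pt : List Int × Int) v => (pt.1 ++ [pt.2 + v], pt.2 + v)) ([0], 0)).1
          (bisLoop (PySem.List.sorted arr (fun x => x)) mid 0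
            (PySem.List.len (PySem.List.sorted arr (fun x => x)))) 0
    = (PySem.List.pyRange 0 (PySem.List.len arr) 1).foldl
        (fun count i =>
          if PySem.List.pyGetD arr i 0 < mid then count + (mid - PySem.List.pyGetD arr i 0)
          else count) 0 := by
  set s := PySem.List.sorted arr (fun x => x) with hsdef
  have hs : s.Pairwise (· ≤ ·) := PySem.List.sorted_pairwise arr (fun x => x)
  -- A's side: index loop over arr = sum of contributions
  have hA : (PySem.List.pyRange 0 (PySem.List.len arr) 1).foldl
      (fun count i =>
        if PySem.List.pyGetD arr i 0 < mid then count + (mid - PySem.List.pyGetD arr i 0)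
        else count) 0
      = (arr.map (fun v => if v < mid then mid - v else 0)).sum := by
    rw [PySem.List.foldl_pyRange_zero_pyGetD arr 0
      (fun count v => if v < mid then count + (mid - v) else count) 0]
    have : (fun (count v : Int) => if v < mid then count + (mid - v) else count)
        = fun count v => count + (if v < mid then mid - v else 0) := by
      funext c v; split_ifs <;> simp
    rw [this, PySem.List.foldl_add]
    simp
  rw [hA]
  -- sum over arr = sum over the sorted list
  have hperm : ((s.map (fun v => if v < mid then mid - v else 0)).sum
      = (arr.map (fun v => if v < mid then mid - v else 0)).sum) :=
    ((PySem.List.sorted_perm arr (fun x => x) false).map _).sum_eq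
  rw [← hperm]
  -- B's side via the split point r
  obtain ⟨r, hr, hrle, hlt, hge⟩ := bis_inv s mid hs s.length 0 (s.length : Int)
    (by omega) (by omega) (by omega) (by omega)
    (fun j hj hja => absurd hja (by omega))
    (fun j hj hja => absurd hja (by omega))
  have hlen : PySem.List.len s = (s.length : Int) := by simp [PySem.List.len]
  rw [hlen, hr, fold_pre s [0] 0]
  have : ([0] ++ preAux s 0 : List Int) = 0 :: preAux s 0 := by simp
  rw [this, PySem.List.pyGetD_natCast, pre_getD s r hrle]
  -- split the sorted sum at r
  have hsplit : s = s.take r ++ s.drop r := (List.take_append_drop r s).symm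
  conv_rhs => rw [hsplit]
  rw [List.map_append, List.sum_append]
  have htake : (s.take r).map (fun v => if v < mid then mid - v else 0)
      = (s.take r).map (fun v => mid - v) := by
    apply List.map_congr_left
    intro y hy
    obtain ⟨i, hi, hiy⟩ := List.mem_iff_getElem.mp hy
    have hil : i < s.length := by
      have := hi; simp [List.length_take] at this; omega
    have : y = s[i]'hil := by rw [← hiy]; simp [List.getElem_take]
    have hir : i < r := by have := hi; simp [List.length_take] at this; omega
    rw [if_pos (this ▸ hlt i hil hir)]
  have hdrop : (s.drop r).map (fun v => if v < mid then mid - v else 0)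
      = (s.drop r).map (fun _ => 0) := by
    apply List.map_congr_left
    intro y hy
    obtain ⟨i, hi, hiy⟩ := List.mem_iff_getElem.mp hy
    have hil : r + i < s.length := by have := hi; simp [List.length_drop] at this; omega
    have : y = s[r + i]'hil := by rw [← hiy]; simp [List.getElem_drop]
    rw [if_neg (not_lt.mpr (this ▸ hge (r + i) hil (by omega)))]
  rw [htake, hdrop, sum_map_sub]
  have hlr : (s.take r).length = r := by simp [List.length_take]; omega
  rw [hlr]
  simp

-- the two outer loops agree step for step
lemma loop_eq (arr : List Int) (K : Int) :
    ∀ (n : Nat) (lo hi res : Int), (hi - lo + 1).toNat ≤ n →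
    searchAltLoop (PySem.List.sorted arr (fun x => x))
      ((PySem.List.sorted arr (fun x => x)).foldl
        (fun (pt : List Int × Int) v => (pt.1 ++ [pt.2 + v], pt.2 + v)) ([0], 0)).1
      K lo hi res
    = searchLoop arr K lo hi res := by
  intro n
  induction n with
  | zero =>
    intro lo hi res hn
    rw [searchAltLoop, searchLoop, dif_neg (by omega), dif_neg (by omega)]
  | succ n ih =>
    intro lo hi res hn
    by_cases h : lo ≤ hi
    · rw [searchAltLoop, searchLoop, dif_pos h, dif_pos h]
      simp only []
      have hm := PySem.Int.floordiv_two_mid_bounds h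
      rw [cost_eq arr (PySem.Int.floordiv (lo + hi) 2)]
      by_cases hc : (PySem.List.pyRange 0 (PySem.List.len arr) 1).foldl
          (fun count i =>
            if PySem.List.pyGetD arr i 0 < PySem.Int.floordiv (lo + hi) 2 then
              count + (PySem.Int.floordiv (lo + hi) 2 - PySem.List.pyGetD arr i 0)
            else count) 0 ≤ K
      · rw [if_pos hc, if_pos hc, ih _ hi _ (by omega)]
      · rw [if_neg hc, if_neg hc, ih lo _ _ (by omega)]
    · rw [searchAltLoop, searchLoop, dif_neg h, dif_neg h]

-- ===== VERDICT (by name: the statement is the Claim_ definition above) =====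
theorem search_spec : Claim_equal_search := by
  intro arr K start end_ _
  unfold Spec_search search search_alt
  exact (loop_eq arr K ((end_ - start + 1).toNat) start end_ 0 le_rfl).symm
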